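-- pv_equiv track=rewrite | github.com/KIMTHE/algorithm-study | TheSim_ps/sex/프로그래머스_전화번호 목록.py | solution
-- ===== SOURCE A (Python) =====
-- def solution(a):
--     answer = []
--
--     for i in a:
--         count=0
--         left=0
--         right=len(i)-1
--         i=list(i)
--
--         while True:
--             if left>right:
--                 answer.append(True)
--                 break
--             if count==1:
--                 answer.append(False)
--                 break
--
--             value=i[left:right+1].count("a")
--
--
--             if i[left]=="a" or  i[right]=="a":
--                 if i[left]=="a":
--                     left+=1
--                 elif i[right]=="a":
--                     right-=1
--
--             elif "a" in i[left:right+1] and "a" not in i[left:value+left] and "a" not in i[right-value+1:right+1]: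
--                     left+=value
--                     right-=value
--             else:
--                 count=1
--
--     return answer
-- ===== SOURCE B (Python) =====
-- def solution(a):
--     return [_good(s) for s in a]
--
-- def _good(s):
--     n = len(s)
--     pre = [0] * (n + 1)
--     for k in range(n):
--         pre[k + 1] = pre[k] + (s[k] == 'a')
--     l, r = 0, n - 1
--     while l <= r:
--         if s[l] == 'a':
--             l += 1
--         elif s[r] == 'a':
--             r -= 1
--         else:
--             v = pre[r + 1] - pre[l]
--             if v <= 0 or pre[l + v] > pre[l] or pre[r + 1 - v] < pre[r + 1]:
--                 return False
--             l += v
--             r -= v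
--     return True
-- ===== Notes on version B (the rewrite author's own statement) =====
-- stated objective: alternative
-- what changed: B precomputes one prefix-sum array of 'a' counts per string and answers every per-iteration window count / membership test of A by comparing two prefix values instead of slicing and rescanning the window, and returns False directly instead of carrying A's count flag for one extra iteration.
import Mathlib
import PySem

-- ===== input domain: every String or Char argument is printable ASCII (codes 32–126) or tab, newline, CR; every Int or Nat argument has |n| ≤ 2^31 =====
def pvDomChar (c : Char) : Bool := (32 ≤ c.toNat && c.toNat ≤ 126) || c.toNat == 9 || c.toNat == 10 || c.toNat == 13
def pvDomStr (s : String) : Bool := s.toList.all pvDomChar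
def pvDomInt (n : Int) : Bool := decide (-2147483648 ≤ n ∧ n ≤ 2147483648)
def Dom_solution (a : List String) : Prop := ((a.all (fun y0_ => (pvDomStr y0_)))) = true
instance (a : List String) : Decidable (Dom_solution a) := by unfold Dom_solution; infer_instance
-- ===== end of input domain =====

-- B answers A's per-iteration slice counts/membership tests from one precomputed prefix-sum array of 'a' counts per string; equal return value proved on all inputs.

-- ===== PORT A =====
-- A's inner while loop over state (count, left, right); slices/indexing via PySem.
def loopA (cs : List Char) (count left right : Int) : Bool :=
  if h1 : left > right then true
  else if h2 : count = 1 then false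
  else
    let value : Int := ((PySem.List.slice cs (some left) (some (right + 1))).count 'a' : Int)
    if PySem.List.pyGet? cs left == some 'a' || PySem.List.pyGet? cs right == some 'a' then
      if PySem.List.pyGet? cs left == some 'a' then loopA cs count (left + 1) right
      else loopA cs count left (right - 1)
    else if hj : (PySem.List.slice cs (some left) (some (right + 1))).contains 'a'
        ∧ ¬ (PySem.List.slice cs (some left) (some (value + left))).contains 'a'
        ∧ ¬ (PySem.List.slice cs (some (right - value + 1)) (some (right + 1))).contains 'a' then
      loopA cs count (left + value) (right - value)
    else loopA cs 1 left right
termination_by (right - left + 1).toNat + (if count = 1 then 0 else 1)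
decreasing_by
  · split_ifs <;> omega
  · split_ifs <;> omega
  · have hv : 0 < (PySem.List.slice cs (some left) (some (right + 1))).count 'a' :=
      List.count_pos_iff.mpr (by simpa using hj.1)
    split_ifs <;> omega
  · split_ifs <;> omega

def solution (a : List String) : List Bool :=
  a.foldl (fun answer i => answer ++ [loopA i.toList 0 0 ((i.toList.length : Int) - 1)]) []

-- ===== PORT B =====
-- pre[k] = number of 'a' among the first k chars (Source B's for-loop building pre).
def buildPre (cs : List Char) (acc : Int) : List Int :=
  match cs with
  | [] => [acc]
  | c :: t => acc :: buildPre t (acc + if c = 'a' then 1 else 0)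

def geti (l : List Int) (i : Int) : Int := PySem.List.pyGetD l i 0

def loopB (cs : List Char) (pre : List Int) (l r : Int) : Bool :=
  if hlr : l ≤ r then
    if PySem.List.pyGet? cs l == some 'a' then loopB cs pre (l + 1) r
    else if PySem.List.pyGet? cs r == some 'a' then loopB cs pre l (r - 1)
    else
      let v : Int := geti pre (r + 1) - geti pre l
      if hv : v ≤ 0 ∨ geti pre l < geti pre (l + v) ∨ geti pre (r + 1 - v) < geti pre (r + 1) then
        false
      else loopB cs pre (l + v) (r - v)
  else true
termination_by (r - l + 1).toNat
decreasing_by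
  · omega
  · omega
  · rcases (by omega : geti pre (r + 1) - geti pre l ≤ 0 ∨ 1 ≤ geti pre (r + 1) - geti pre l) with h1 | h1
    · exact absurd (Or.inl h1) hv
    · omega

def solution_alt (a : List String) : List Bool :=
  a.map (fun s =>
    let cs := s.toList
    loopB cs (buildPre cs 0) 0 ((cs.length : Int) - 1))

-- ===== PRECONDITION & SPEC =====
def Spec_solution (a : List String) (out : List Bool) : Prop := out = solution_alt a
instance (a : List String) (out : List Bool) : Decidable (Spec_solution a out) := by unfold Spec_solution; infer_instance

-- ===== CLAIM (what is proved, stated in full; the proofs are below) =====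
def Claim_equal_solution : Prop := ∀ (a : List String), Dom_solution a → Spec_solution a (solution a)

-- ===== LEMMAS AND PROOFS =====

-- prefix count of 'a' in the first k characters
def aCnt (cs : List Char) (k : Nat) : Int := ((cs.take k).count 'a' : Int)

lemma geti_buildPre (cs : List Char) (acc : Int) (k : Nat) (hk : k ≤ cs.length) :
    geti (buildPre cs acc) (k : Int) = acc + aCnt cs k := by
  induction cs generalizing acc k with
  | nil =>
    have hk0 : k = 0 := by simp at hk; omega
    subst hk0
    simp [buildPre, geti, aCnt]
  | cons c t ih =>
    cases k with
    | zero => simp [buildPre, geti, aCnt]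
    | succ m =>
      have hm : m ≤ t.length := by simpa using hk
      have hstep : aCnt (c :: t) (m + 1) = (if c = 'a' then 1 else 0) + aCnt t m := by
        by_cases hc : c = 'a' <;>
          simp [aCnt, List.take_succ_cons, List.count_cons, beq_iff_eq, hc] <;> omega
      have hgd : geti (buildPre (c :: t) acc) ((m + 1 : Nat) : Int)
          = geti (buildPre t (acc + if c = 'a' then 1 else 0)) ((m : Nat) : Int) := by
        rw [geti, geti, PySem.List.pyGetD_natCast, PySem.List.pyGetD_natCast]
        simp [buildPre]
      rw [hgd, ih _ m hm, hstep]
      ring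

lemma slice_count (cs : List Char) (x y : Int) (hx : 0 ≤ x) (hxy : x ≤ y) :
    ((PySem.List.slice cs (some x) (some y)).count 'a' : Int) = aCnt cs y.toNat - aCnt cs x.toNat := by
  rw [PySem.List.slice_toNat cs hx (le_trans hx hxy)]
  have hab : x.toNat ≤ y.toNat := by omega
  have : cs.take y.toNat = cs.take x.toNat ++ (cs.drop x.toNat).take (y.toNat - x.toNat) := by
    rw [← List.take_add]
    congr 1
    omega
  unfold aCnt
  rw [this, List.count_append]
  push_cast
  ring

lemma contains_iff_count (xs : List Char) : xs.contains 'a' = true ↔ 0 < ((xs.count 'a' : Nat) : Int) := by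
  constructor
  · intro h
    have : 'a' ∈ xs := by simpa using h
    have := List.count_pos_iff.mpr this
    omega
  · intro h
    have : 'a' ∈ xs := List.count_pos_iff.mp (by omega)
    simpa using this

lemma main_loop (n : Nat) : ∀ (cs : List Char) (count l r : Int),
    (r - l + 1).toNat ≤ n → count ≠ 1 → 0 ≤ l → l ≤ (cs.length : Int) → r < (cs.length : Int) →
    loopA cs count l r = loopB cs (buildPre cs 0) l r := by
  induction n with
  | zero =>
    intro cs count l r hn hc hl hln hr
    have hgt : l > r := by omega
    rw [loopA, loopB]
    simp [hgt, not_le.mpr hgt]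
  | succ m ih =>
    intro cs count l r hn hc hl hln hr
    by_cases hgt : l > r
    · rw [loopA, loopB]
      simp [hgt, not_le.mpr hgt]
    · have hlr : l ≤ r := not_lt.mp hgt
      have hr0 : 0 ≤ r := le_trans hl hlr
      -- abbreviations
      set pre := buildPre cs 0 with hpre
      have hT : ∀ k : Int, 0 ≤ k → k ≤ (cs.length : Int) → geti pre k = aCnt cs k.toNat := by
        intro k h0 hk
        have h := geti_buildPre cs 0 k.toNat (by omega)
        have e : ((k.toNat : Nat) : Int) = k := by omega
        rw [e] at h
        rw [h]; ring
      set value : Int := ((PySem.List.slice cs (some l) (some (r + 1))).count 'a' : Int) with hvdef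
      have hv0 : 0 ≤ value := by positivity
      have hvle : value ≤ r + 1 - l := by
        have h1 : (PySem.List.slice cs (some l) (some (r + 1))).count 'a'
            ≤ (PySem.List.slice cs (some l) (some (r + 1))).length := List.count_le_length
        have h2 : (PySem.List.slice cs (some l) (some (r + 1))).length ≤ (r + 1 - l).toNat := by
          rw [PySem.List.slice_toNat cs hl (by omega)]
          simp only [List.length_take, List.length_drop]
          omega
        omega
      -- value as prefix difference
      have hval : value = geti pre (r + 1) - geti pre l := by
        rw [hT (r+1) (by omega) (by omega), hT l hl hln, hvdef,
          slice_count cs l (r+1) hl (by omega)]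
      by_cases hpl : (PySem.List.pyGet? cs l == some 'a') = true
      · rw [loopA, loopB]
        simp only [hgt, hc, hpl, hlr, dite_eq_ite, if_true, if_false, Bool.true_or, dif_pos hlr,
          dif_neg hgt, if_neg hc]
        exact ih cs count (l+1) r (by omega) hc (by omega) (by omega) hr
      · by_cases hpr : (PySem.List.pyGet? cs r == some 'a') = true
        · rw [loopA, loopB]
          simp only [hgt, hc, hpl, hpr, hlr, dif_pos hlr, dif_neg hgt, if_neg hc,
            Bool.false_or, if_true, if_false]
          exact ih cs count l (r-1) (by omega) hc hl hln (by omega)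
        · -- no edge 'a'
          have hF1 : (PySem.List.slice cs (some l) (some (r + 1))).contains 'a' = true ↔
              ¬ (geti pre (r + 1) - geti pre l ≤ 0) := by
            rw [contains_iff_count, ← hvdef, ← hval]; omega
          have hvlen : l + value ≤ (cs.length : Int) := by omega
          have hF2 : (PySem.List.slice cs (some l) (some (value + l))).contains 'a' = true ↔
              geti pre l < geti pre (l + value) := by
            rw [contains_iff_count, slice_count cs l (value + l) hl (by omega),
              hT (l + value) (by omega) hvlen, hT l hl hln]
            have : (value + l).toNat = (l + value).toNat := by omega
            rw [this]; omega
          have hF3 : (PySem.List.slice cs (some (r - value + 1)) (some (r + 1))).contains 'a' = true ↔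
              geti pre (r + 1 - value) < geti pre (r + 1) := by
            rw [contains_iff_count, slice_count cs (r - value + 1) (r + 1) (by omega) (by omega),
              hT (r + 1 - value) (by omega) (by omega), hT (r + 1) (by omega) (by omega)]
            have : (r - value + 1).toNat = (r + 1 - value).toNat := by omega
            rw [this]; omega
          have hpl' : (PySem.List.pyGet? cs l == some 'a') = false := by simpa using hpl
          have hpr' : (PySem.List.pyGet? cs r == some 'a') = false := by simpa using hpr
          rw [loopA, loopB]
          simp only [dif_neg hgt, dif_pos hlr, dif_neg hc, hpl', hpr', Bool.false_or,
            Bool.false_eq_true, if_false]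
          rw [← hvdef]
          rw [show geti pre (r + 1) - geti pre l = value from hval.symm]
          by_cases hJ : (PySem.List.slice cs (some l) (some (r + 1))).contains 'a' = true
              ∧ ¬ (PySem.List.slice cs (some l) (some (value + l))).contains 'a' = true
              ∧ ¬ (PySem.List.slice cs (some (r - value + 1)) (some (r + 1))).contains 'a' = true
          · have hv1 : 1 ≤ value := by
              have := hF1.mp hJ.1
              omega
            have hFB' : ¬ (value ≤ 0 ∨ geti pre l < geti pre (l + value) ∨
                geti pre (r + 1 - value) < geti pre (r + 1)) := by
              push_neg
              refine ⟨by omega, ?_, ?_⟩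
              · have := hF2.not.mp hJ.2.1
                simp only [hval] at this ⊢
                omega
              · have := hF3.not.mp hJ.2.2
                simp only [hval] at this ⊢
                omega
            rw [dif_pos hJ, dif_neg hFB']
            exact ih cs count (l + value) (r - value) (by omega) hc (by omega) hvlen (by omega)
          · have hFB : value ≤ 0 ∨ geti pre l < geti pre (l + value) ∨
                geti pre (r + 1 - value) < geti pre (r + 1) := by
              by_contra hcon
              push_neg at hcon
              refine hJ ⟨hF1.mpr (by omega), fun h => ?_, fun h => ?_⟩
              · have := hF2.mp h
                omega
              · have := hF3.mp h
                omega
            rw [dif_neg hJ, dif_pos hFB]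
            rw [loopA]
            simp [hgt]

lemma per_string (s : String) :
    loopA s.toList 0 0 ((s.toList.length : Int) - 1)
      = loopB s.toList (buildPre s.toList 0) 0 ((s.toList.length : Int) - 1) := by
  exact main_loop (s.toList.length) s.toList 0 0 ((s.toList.length : Int) - 1)
    (by omega) (by decide) (by omega) (by omega) (by omega)

lemma solution_foldl (a : List String) (acc : List Bool) :
    a.foldl (fun answer i => answer ++ [loopA i.toList 0 0 ((i.toList.length : Int) - 1)]) acc
      = acc ++ a.map (fun s => loopB s.toList (buildPre s.toList 0) 0 ((s.toList.length : Int) - 1)) := by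
  induction a generalizing acc with
  | nil => simp
  | cons s t ih =>
    simp only [List.foldl_cons, List.map_cons]
    rw [ih, per_string s]
    simp

-- ===== VERDICT (by name: the statement is the Claim_ definition above) =====
theorem solution_spec : Claim_equal_solution := by
  intro a _
  unfold Spec_solution solution solution_alt
  simpa using solution_foldl a []
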